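-- pv_equiv track=rewrite | github.com/ls1intum/edutelligence | logos/logos-workernode/logos_worker_node/calibration.py | _max_tp_for_plan
-- ===== SOURCE A (Python) =====
-- from typing import Any
--
-- def _max_tp_for_plan(plan: dict[str, Any], available_gpus: int) -> int:
--     """Return the maximum tensor_parallel_size allowed for *plan*.
--
--     TP must be a power of 2 for most model architectures (attention heads
--     must be evenly divisible).  Round down to the largest power of 2 that
--     fits within the available GPUs.
--     """
--     gpu_devices = str(plan.get("gpu_devices") or "").strip().lower()
--     if not gpu_devices or gpu_devices == "all":
--         n = available_gpus
--     else:
--         n = len([x for x in gpu_devices.split(",") if x.strip().isdigit()])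
--     # Largest power of 2 ≤ n  (e.g. 3 → 2, 5 → 4, 7 → 4, 8 → 8)
--     if n < 1:
--         return 1
--     return 1 << (n.bit_length() - 1)
-- ===== SOURCE B (Python) =====
-- def _max_tp_for_plan(plan: dict, available_gpus: int) -> int:
--     """Return the maximum tensor_parallel_size allowed for *plan*."""
--     gpu_devices = str(plan.get("gpu_devices") or "").strip().lower()
--     if not gpu_devices or gpu_devices == "all":
--         n = available_gpus
--     else:
--         n = sum(1 for x in gpu_devices.split(",") if x.strip().isdigit())
--     # Largest power of 2 <= n by iterative doubling; 1 when n < 2.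
--     power = 1
--     while power * 2 <= n:
--         power *= 2
--     return power
-- ===== Notes on version B (the rewrite author's own statement) =====
-- stated objective: alternative
-- what changed: The closed-form bit trick 1 << (n.bit_length() - 1) (with its special-case guard for n < 1) is replaced by an iterative doubling loop starting at power = 1, and the digit-segment count is accumulated with a generator sum instead of len of a list comprehension.
import Mathlib
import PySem

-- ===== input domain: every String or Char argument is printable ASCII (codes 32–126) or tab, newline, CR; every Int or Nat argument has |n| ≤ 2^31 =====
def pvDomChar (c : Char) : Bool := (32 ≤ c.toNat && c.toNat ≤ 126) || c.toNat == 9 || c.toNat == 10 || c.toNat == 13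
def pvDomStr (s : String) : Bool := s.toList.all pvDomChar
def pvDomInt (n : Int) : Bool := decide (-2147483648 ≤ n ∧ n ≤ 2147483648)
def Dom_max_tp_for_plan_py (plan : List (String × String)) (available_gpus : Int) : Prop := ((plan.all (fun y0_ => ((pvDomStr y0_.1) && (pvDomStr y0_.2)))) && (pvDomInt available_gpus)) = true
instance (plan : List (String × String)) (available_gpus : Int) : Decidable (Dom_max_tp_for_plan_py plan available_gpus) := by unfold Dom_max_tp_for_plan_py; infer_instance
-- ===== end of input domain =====

-- B replaces A's `1 << (n.bit_length() - 1)` bit trick (and its n < 1 guard) by an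
-- iterative doubling loop from power = 1; the GPU-device parsing is unchanged.

-- ===== PORT A =====
-- Python int.bit_length() for a nonnegative argument: 0 for 0, else ⌊log2 n⌋ + 1.
def pyBitLength : Nat → Nat
  | 0 => 0
  | n + 1 => pyBitLength ((n + 1) / 2) + 1
decreasing_by exact Nat.div_lt_self (Nat.succ_pos n) one_lt_two

def max_tp_for_plan_py (plan : List (String × String)) (available_gpus : Int) : Int :=
  -- gpu_devices = str(plan.get("gpu_devices") or "").strip().lower()
  let gpu_devices :=
    PySem.Str.lower (PySem.Str.strip (((plan.find? (fun kv => kv.1 == "gpu_devices")).map (·.2)).getD ""))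
  let n : Int :=
    if gpu_devices == "" || gpu_devices == "all" then available_gpus
    else (((PySem.Str.split? gpu_devices ",").getD []).filter
            (fun x => PySem.Str.strIsdigit (PySem.Str.strip x))).length
  if n < 1 then 1
  else (2 : Int) ^ (pyBitLength n.toNat - 1)   -- 1 << k = 2^k

-- ===== PORT B =====
-- while power * 2 <= n: power *= 2  (power starts at 1, so stays positive)
def tpDouble (n : Int) (power : Int) (hp : 0 < power) : Int :=
  if h : power * 2 ≤ n then tpDouble n (power * 2) (by omega) else power
termination_by (n - power).toNat
decreasing_by omega

def max_tp_for_plan_py_alt (plan : List (String × String)) (available_gpus : Int) : Int :=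
  let gpu_devices :=
    PySem.Str.lower (PySem.Str.strip (((plan.find? (fun kv => kv.1 == "gpu_devices")).map (·.2)).getD ""))
  let n : Int :=
    if gpu_devices == "" || gpu_devices == "all" then available_gpus
    else ((PySem.Str.split? gpu_devices ",").getD []).foldl
           (fun acc x => if PySem.Str.strIsdigit (PySem.Str.strip x) then acc + 1 else acc) (0 : Int)
  tpDouble n 1 one_pos

-- ===== PRECONDITION & SPEC =====
def Spec_max_tp_for_plan_py (plan : List (String × String)) (available_gpus : Int) (out : Int) : Prop := out = max_tp_for_plan_py_alt plan available_gpus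
instance (plan : List (String × String)) (available_gpus : Int) (out : Int) : Decidable (Spec_max_tp_for_plan_py plan available_gpus out) := by unfold Spec_max_tp_for_plan_py; infer_instance

-- ===== CLAIM (what is proved, stated in full; the proofs are below) =====
def Claim_equal_max_tp_for_plan_py : Prop := ∀ (plan : List (String × String)) (available_gpus : Int), Dom_max_tp_for_plan_py plan available_gpus → Spec_max_tp_for_plan_py plan available_gpus (max_tp_for_plan_py plan available_gpus)

-- ===== LEMMAS AND PROOFS =====

lemma pyBitLength_pos {m : Nat} (hm : 0 < m) : 0 < pyBitLength m := by
  cases m with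
  | zero => omega
  | succ k => rw [pyBitLength]; omega

lemma pyBitLength_step {m : Nat} (hm : 0 < m) : pyBitLength m = pyBitLength (m / 2) + 1 := by
  cases m with
  | zero => omega
  | succ k => rw [pyBitLength]

lemma tpDouble_eq (n p : Int) (hp : 0 < p) (hpn : p ≤ n) :
    tpDouble n p hp = p * 2 ^ (pyBitLength (n.toNat / p.toNat) - 1) := by
  rw [tpDouble]
  by_cases h : p * 2 ≤ n
  · rw [dif_pos h, tpDouble_eq n (p * 2) (by omega) h]
    have hp2 : (p * 2).toNat = p.toNat * 2 := by omega
    have hdiv : n.toNat / (p * 2).toNat = n.toNat / p.toNat / 2 := by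
      rw [hp2, Nat.div_div_eq_div_mul]
    have hm2 : 2 ≤ n.toNat / p.toNat := by
      have : p.toNat * 2 ≤ n.toNat := by omega
      exact (Nat.le_div_iff_mul_le (by omega)).2 (by omega)
    have hstep := pyBitLength_step (m := n.toNat / p.toNat) (by omega)
    have hpos : 0 < pyBitLength (n.toNat / p.toNat / 2) :=
      pyBitLength_pos (by omega)
    rw [hdiv, hstep]
    have : pyBitLength (n.toNat / p.toNat / 2) + 1 - 1
        = (pyBitLength (n.toNat / p.toNat / 2) - 1) + 1 := by omega
    rw [this, pow_succ]
    ring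
  · rw [dif_neg h]
    have h1 : n.toNat / p.toNat = 1 := by
      have hlt : n.toNat < p.toNat * 2 := by omega
      have hge : p.toNat ≤ n.toNat := by omega
      have := Nat.div_lt_iff_lt_mul (x := n.toNat) (k := p.toNat) (y := 2) (by omega)
      have h2 : n.toNat / p.toNat < 2 := this.2 (by omega)
      have h3 : 1 ≤ n.toNat / p.toNat := (Nat.one_le_div_iff (by omega)).2 hge
      omega
    rw [h1]
    simp [pyBitLength]
termination_by (n - p).toNat
decreasing_by omega

lemma tail_eq (n : Int) :
    (if n < 1 then (1 : Int) else (2 : Int) ^ (pyBitLength n.toNat - 1)) = tpDouble n 1 one_pos := by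
  by_cases hn : n < 1
  · rw [if_pos hn, tpDouble, dif_neg (by omega)]
  · rw [if_neg hn, tpDouble_eq n 1 one_pos (by omega)]
    simp

lemma foldl_count (l : List String) (a : Int) :
    l.foldl (fun acc x => if PySem.Str.strIsdigit (PySem.Str.strip x) then acc + 1 else acc) a
      = a + ((l.filter (fun x => PySem.Str.strIsdigit (PySem.Str.strip x))).length : Int) := by
  induction l generalizing a with
  | nil => simp
  | cons b l ih =>
    rw [List.foldl_cons]
    by_cases h : PySem.Str.strIsdigit (PySem.Str.strip b)
    · rw [if_pos h, ih, List.filter_cons_of_pos (by simpa using h), List.length_cons]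
      push_cast
      ring
    · rw [if_neg h, ih, List.filter_cons_of_neg (by simpa using h)]

lemma count_eq (l : List String) :
    ((l.filter (fun x => PySem.Str.strIsdigit (PySem.Str.strip x))).length : Int)
      = l.foldl (fun acc x => if PySem.Str.strIsdigit (PySem.Str.strip x) then acc + 1 else acc) (0 : Int) := by
  rw [foldl_count]
  ring

-- ===== VERDICT (by name: the statement is the Claim_ definition above) =====
theorem max_tp_for_plan_py_spec : Claim_equal_max_tp_for_plan_py := by
  intro plan available_gpus _
  unfold Spec_max_tp_for_plan_py max_tp_for_plan_py max_tp_for_plan_py_alt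
  simp only
  rw [count_eq, tail_eq]
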